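-- pv_equiv track=rewrite | github.com/Steve2608/AoC-2022 | 17/17.py | can_shift_left
-- ===== SOURCE A (Python) =====
-- def can_shift_left(field: list[list[str]], rock: list[list[str]]) -> bool:
--     # collision against left wall
--     if not all(l[0] == '.' for l in rock):
--         return False
--
--     for f, r in zip(field, rock):
--         for i, r_i in enumerate(r[1:], 1):
--             if r_i == '#' and f[i - 1] == '#':
--                 return False
--     return True
-- ===== SOURCE B (Python) =====
-- def _mask(row):
--     # integer bitmask: bit j set iff row[j] == '#'
--     m = 0
--     for c in reversed(row):
--         m = (m << 1) + (1 if c == '#' else 0)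
--     return m
--
--
-- def can_shift_left(field: list[list[str]], rock: list[list[str]]) -> bool:
--     fmasks = [_mask(row) for row in field]
--     for i, row in enumerate(rock):
--         if not row or row[0] != '.':
--             return False
--         fm = fmasks[i] if i < len(fmasks) else 0
--         if _mask(row) & (fm << 1):
--             return False
--     return True
-- ===== Notes on version B (the rewrite author's own statement) =====
-- stated objective: idiomatic
-- what changed: B replaces A's nested per-cell scan (enumerate over r[1:] against f[i-1]) with per-row integer bitmasks: each row is encoded once as a '#'-bitmask and a single '&' with the shifted field mask decides the whole row's collision.
-- outside the precondition, e.g. on can_shift_left([['#']], [['.', '#', '#']]): A returns False, B returns False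
import Mathlib
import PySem

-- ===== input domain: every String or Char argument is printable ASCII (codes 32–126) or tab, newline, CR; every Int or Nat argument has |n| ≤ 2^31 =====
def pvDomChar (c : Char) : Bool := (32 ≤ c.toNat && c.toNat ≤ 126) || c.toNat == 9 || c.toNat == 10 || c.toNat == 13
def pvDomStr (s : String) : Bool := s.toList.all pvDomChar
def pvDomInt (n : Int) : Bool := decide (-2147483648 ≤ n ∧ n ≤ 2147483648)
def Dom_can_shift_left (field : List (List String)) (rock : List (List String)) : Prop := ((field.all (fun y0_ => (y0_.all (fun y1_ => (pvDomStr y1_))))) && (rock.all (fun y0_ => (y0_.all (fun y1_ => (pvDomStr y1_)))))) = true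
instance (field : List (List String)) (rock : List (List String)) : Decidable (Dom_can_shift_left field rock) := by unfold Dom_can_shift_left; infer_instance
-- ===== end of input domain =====

-- B replaces A's nested per-cell scan with per-row integer bitmasks: one combined '&' with a
-- shifted field mask decides the whole row's collision (idiomatic bit-twiddling, same cost class).

-- ===== PORT A =====
-- A: guard 'all rock rows start with "."', then nested loop over zip(field, rock) and
-- enumerate(r[1:], 1) looking for r[i]='#' against f[i-1]='#'.  Python's l[0] / f[i-1]
-- raise IndexError out of range; the port reads them with headD/getD "" — exact on Pre_.
def can_shift_left (field : List (List String)) (rock : List (List String)) : Bool :=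
  if !(rock.all fun l => l.headD "" == ".") then
    false
  else if (field.zip rock).any (fun fr =>
      ((fr.2.drop 1).zipIdx 1).any (fun ci => ci.1 == "#" && fr.1.getD (ci.2 - 1) "" == "#")) then
    false
  else
    true

-- ===== PORT B =====
-- bit j of pvMask row set iff row[j] = "#"  (Source B's _mask, folded from the right)
def pvMask (row : List String) : Nat :=
  row.foldr (fun c m => 2 * m + (if c == "#" then 1 else 0)) 0

def can_shift_left_alt (field : List (List String)) (rock : List (List String)) : Bool :=
  -- fmasks := field.map pvMask (Source B's precomputed list of field-row masks, used once below)
  !(rock.zipIdx.any fun ri =>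
      (ri.1.isEmpty || ri.1.headD "" != ".") ||
      (pvMask ri.1 &&& (((field.map pvMask).getD ri.2 0) <<< 1) != 0))

-- ===== PRECONDITION & SPEC =====
-- Pre_ excludes the inputs on which Python A's indexing raises IndexError: an empty rock row
-- reached by the wall guard (l[0]), or — once every rock row starts with '.' — a '#' in a rock
-- row at a column past the end of the paired field row (f[i-1]); the second conjunct is
-- conservative: on a few such inputs A still returns False via an earlier collision (see cites).
def Pre_can_shift_left (field : List (List String)) (rock : List (List String)) : Prop :=
  (∀ k, (hk : k < rock.length) → rock[k] = [] →
    ∃ j, ∃ hj : j < k, (rock[j]'(Nat.lt_trans hj hk)).headD "" ≠ ".") ∧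
  ((∀ l ∈ rock, l.headD "" = ".") →
    ∀ fr ∈ field.zip rock, ∀ ci ∈ (fr.2.drop 1).zipIdx 1, ci.1 = "#" → ci.2 - 1 < fr.1.length)
instance (field : List (List String)) (rock : List (List String)) : Decidable (Pre_can_shift_left field rock) := by unfold Pre_can_shift_left; infer_instance

def pvWitness_can_shift_left : List (List String) × List (List String) :=
  ([[".", "#"], ["#", "."]], [[".", "#"], [".", "."]])

def Spec_can_shift_left (field : List (List String)) (rock : List (List String)) (out : Bool) : Prop := out = can_shift_left_alt field rock
instance (field : List (List String)) (rock : List (List String)) (out : Bool) : Decidable (Spec_can_shift_left field rock out) := by unfold Spec_can_shift_left; infer_instance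

-- ===== CLAIM (what is proved, stated in full; the proofs are below) =====
def Claim_equal_can_shift_left : Prop := ∀ (field : List (List String)) (rock : List (List String)), Dom_can_shift_left field rock → Pre_can_shift_left field rock → Spec_can_shift_left field rock (can_shift_left field rock)

-- ===== LEMMAS AND PROOFS =====

-- bit characterisation of the mask
theorem testBit_pvMask (row : List String) (i : Nat) :
    (pvMask row).testBit i = (row.getD i "" == "#") := by
  induction row generalizing i with
  | nil => simp [pvMask, Nat.zero_testBit]
  | cons c cs ih =>
    cases i with
    | zero =>
      simp only [pvMask, List.foldr_cons, Nat.testBit_zero, List.getD_cons_zero]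
      rcases (c == "#") with _ | _ <;> simp
    | succ j =>
      simp only [pvMask, List.foldr_cons, Nat.testBit_succ, List.getD_cons_succ]
      have : (2 * List.foldr (fun c m => 2 * m + if c == "#" then 1 else 0) 0 cs
          + if c == "#" then 1 else 0) / 2
          = List.foldr (fun c m => 2 * m + if c == "#" then 1 else 0) 0 cs := by
        rcases (c == "#") <;> simp <;> omega
      rw [this]; exact ih j

theorem ne_zero_iff_testBit (n : Nat) : (n ≠ 0) ↔ ∃ i, n.testBit i := by
  constructor
  · intro h
    by_contra hc
    push_neg at hc
    exact h (Nat.eq_of_testBit_eq (fun i => by simp [hc i]))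
  · rintro ⟨i, hi⟩ h0
    simp [h0] at hi

-- the per-row mask test equals the existence of a colliding column
theorem mask_collide (f r : List String) :
    (pvMask r &&& (pvMask f <<< 1) ≠ 0)
      ↔ ∃ i, 1 ≤ i ∧ r.getD i "" = "#" ∧ f.getD (i - 1) "" = "#" := by
  rw [ne_zero_iff_testBit]
  constructor
  · rintro ⟨i, hi⟩
    rw [Nat.testBit_and, Bool.and_eq_true, Nat.testBit_shiftLeft] at hi
    obtain ⟨h1, h2⟩ := hi
    rw [Bool.and_eq_true, decide_eq_true_iff] at h2
    refine ⟨i, h2.1, ?_, ?_⟩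
    · have := testBit_pvMask r i; rw [h1] at this; exact (beq_iff_eq.mp this.symm)
    · have := testBit_pvMask f (i - 1); rw [h2.2] at this; exact (beq_iff_eq.mp this.symm)
  · rintro ⟨i, h1, h2, h3⟩
    refine ⟨i, ?_⟩
    rw [Nat.testBit_and, Bool.and_eq_true, Nat.testBit_shiftLeft]
    refine ⟨by rw [testBit_pvMask]; simp [List.getD] at h2 ⊢; simp [h2], ?_⟩
    rw [Bool.and_eq_true, decide_eq_true_iff]
    exact ⟨h1, by rw [testBit_pvMask]; simp [List.getD] at h3 ⊢; simp [h3]⟩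

-- A's inner loop over (r.drop 1).zipIdx 1 equals the same existence statement
theorem any_zipIdx {α : Type} (l : List α) (n : Nat) (p : α → Nat → Bool) :
    ((l.zipIdx n).any fun ci => p ci.1 ci.2) = true
      ↔ ∃ j, ∃ h : j < l.length, p l[j] (n + j) := by
  induction l generalizing n with
  | nil => simp
  | cons a l ih =>
    simp only [List.zipIdx_cons, List.any_cons, Bool.or_eq_true, ih]
    constructor
    · rintro (h | ⟨j, hj, hp⟩)
      · exact ⟨0, by simp, by simpa using h⟩
      · exact ⟨j + 1, by simpa using hj, by simpa [Nat.add_assoc, Nat.add_comm 1 j] using hp⟩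
    · rintro ⟨j, hj, hp⟩
      cases j with
      | zero => exact Or.inl (by simpa using hp)
      | succ k =>
        exact Or.inr ⟨k, by simpa using hj, by
          simpa [Nat.add_assoc, Nat.add_comm 1 k] using hp⟩

theorem collide_row (f r : List String) :
    (((r.drop 1).zipIdx 1).any fun ci => ci.1 == "#" && f.getD (ci.2 - 1) "" == "#")
      = (pvMask r &&& (pvMask f <<< 1) != 0) := by
  rw [Bool.eq_iff_iff, bne_iff_ne, any_zipIdx (r.drop 1) 1 (fun c i => c == "#" && f.getD (i-1) "" == "#"),
    mask_collide]
  constructor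
  · rintro ⟨j, hj, hp⟩
    rw [Bool.and_eq_true, beq_iff_eq, beq_iff_eq] at hp
    refine ⟨1 + j, by omega, ?_, ?_⟩
    · have hlen : 1 + j < r.length := by
        have := hj; simp [List.length_drop] at this; omega
      rw [List.getD_eq_getElem _ _ hlen]
      have : (r.drop 1)[j] = r[1 + j] := by
        rw [List.getElem_drop]
      rw [← this]; exact hp.1
    · simpa using hp.2
  · rintro ⟨i, h1, h2, h3⟩
    have hlen : i < r.length := by
      by_contra hc
      rw [List.getD_eq_default _ _ (by omega)] at h2
      simp at h2
    refine ⟨i - 1, by simp [List.length_drop]; omega, ?_⟩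
    rw [Bool.and_eq_true, beq_iff_eq, beq_iff_eq]
    constructor
    · have : (r.drop 1)[i-1]'(by simp [List.length_drop]; omega) = r[1 + (i-1)]'(by omega) := by
        rw [List.getElem_drop]
      rw [this]
      have : 1 + (i - 1) = i := by omega
      simp only [this]
      rw [List.getD_eq_getElem _ _ hlen] at h2; exact h2
    · have : 1 + (i - 1) - 1 = i - 1 := by omega
      rw [this]; exact h3

-- per-row: A's wall check && no collision  =  negation of B's row test
theorem row_eq (f r : List String) :
    ((r.headD "" == ".") &&
      !(((r.drop 1).zipIdx 1).any fun ci => ci.1 == "#" && f.getD (ci.2 - 1) "" == "#"))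
      = !((r.isEmpty || r.headD "" != ".") || (pvMask r &&& (pvMask f <<< 1) != 0)) := by
  rw [collide_row]
  cases r with
  | nil => simp
  | cons a l => simp [Bool.not_or, bne]

-- B rewritten as a pairwise recursion (absorbing zipIdx's index into the mask list)
def pvAnyB (ms : List Nat) (rock : List (List String)) : Bool :=
  match rock with
  | [] => false
  | r :: rs =>
      ((r.isEmpty || r.headD "" != ".") || (pvMask r &&& ((ms.headD 0) <<< 1) != 0))
        || pvAnyB ms.tail rs

theorem zipIdx_any_eq_pvAnyB (ms : List Nat) (rock : List (List String)) (n : Nat) :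
    ((rock.zipIdx n).any fun ri =>
        (ri.1.isEmpty || ri.1.headD "" != ".") ||
        (pvMask ri.1 &&& ((ms.getD ri.2 0) <<< 1) != 0))
      = pvAnyB (ms.drop n) rock := by
  induction rock generalizing n with
  | nil => simp [pvAnyB]
  | cons r rs ih =>
    simp only [List.zipIdx_cons, List.any_cons, pvAnyB, ih (n + 1)]
    have h1 : ms.getD n 0 = (ms.drop n).headD 0 := by
      induction ms generalizing n with
      | nil => simp
      | cons m ms ihm =>
        cases n with
        | zero => simp
        | succ k => simpa using ihm k
    rw [h1, List.tail_drop]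

theorem bool_aux (a b A B : Bool) :
    ((a && A) && !(b || B)) = ((a && !b) && (A && !B)) := by
  cases a <;> cases b <;> cases A <;> cases B <;> rfl

theorem wallcoll (rock field : List (List String)) :
    ((rock.all fun l => l.headD "" == ".") &&
      !((field.zip rock).any fun fr =>
        ((fr.2.drop 1).zipIdx 1).any fun ci => ci.1 == "#" && fr.1.getD (ci.2 - 1) "" == "#"))
      = !(pvAnyB (field.map pvMask) rock) := by
  induction rock generalizing field with
  | nil => simp [pvAnyB]
  | cons r rs ih =>
    cases field with
    | nil =>
      have hih := ih []
      simp only [List.zip_nil_left, List.any_nil, Bool.not_false, Bool.and_true,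
        List.map_nil] at hih
      have hrow : (r.headD "" == ".") = !(r.isEmpty || r.headD "" != ".") := by
        cases r <;> simp [bne]
      simp only [List.zip_nil_left, List.any_nil, Bool.not_false, Bool.and_true,
        List.all_cons, List.map_nil, pvAnyB, List.headD_nil, List.tail_nil, Bool.not_or]
      rw [hrow]
      have hm : (pvMask r &&& ((0:Nat) <<< 1) != 0) = false := by simp
      rw [hm]
      simp only [List.headD_eq_head?_getD] at hih
      simp [Bool.not_or, Bool.and_assoc, hih]
    | cons f fs =>
      simp only [List.zip_cons_cons, List.any_cons, List.all_cons, List.map_cons, pvAnyB,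
        List.headD_cons, List.tail_cons]
      rw [bool_aux, row_eq, ih fs]
      simp [Bool.not_or, Bool.and_assoc]

-- main equality of the two ports (holds for ALL inputs of the ports)
theorem ports_eq (field rock : List (List String)) :
    can_shift_left field rock = can_shift_left_alt field rock := by
  unfold can_shift_left can_shift_left_alt
  rw [zipIdx_any_eq_pvAnyB (field.map pvMask) rock 0, List.drop_zero]
  rw [← wallcoll rock field]
  cases h1 : (rock.all fun l => l.headD "" == ".") <;>
    cases h2 : ((field.zip rock).any fun fr =>
        ((fr.2.drop 1).zipIdx 1).any fun ci => ci.1 == "#" && fr.1.getD (ci.2 - 1) "" == "#") <;>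
    simp [h1, h2]

-- ===== VERDICT (by name: the statement is the Claim_ definition above) =====
theorem can_shift_left_spec : Claim_equal_can_shift_left := by
  intro field rock _ _
  exact ports_eq field rock
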